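-- pv_equiv track=rewrite | github.com/jim0607/Leetcode | Solutions/0562.Longest-Line-of-Consecutive-One-in-Matrix.py | longest_diagonal_line
-- ===== SOURCE A (Python) =====
-- def longest_diagonal_line(matrix):
--     m, n = len(matrix), len(matrix[0])
--     dp = [[0] * n for _ in range(m)]
--     for i in range(m):
--         if matrix[i][0] == 1:
--             dp[i][0] = 1
--     for j in range(n):
--         if matrix[0][j] == 1:
--             dp[0][j] = 1
--     for i in range(1, m):
--         for j in range(1, n):
--             if matrix[i][j] == 1:
--                 dp[i][j] = dp[i-1][j-1] + 1
--
--     max_lens = 0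
--     for i in range(m):
--         for j in range(n):
--             max_lens = max(max_lens, dp[i][j])
--     return max_lens
-- ===== SOURCE B (Python) =====
-- def longest_diagonal_line(matrix):
--     m, n = len(matrix), len(matrix[0])
--     best = 0
--     starts = [(0, j) for j in range(n)] + [(i, 0) for i in range(1, m)]
--     for i, j in starts:
--         cnt = 0
--         while i < m and j < n:
--             cnt = cnt + 1 if matrix[i][j] == 1 else 0
--             if cnt > best:
--                 best = cnt
--             i += 1
--             j += 1
--     return best
-- ===== Notes on version B (the rewrite author's own statement) =====
-- stated objective: simpler
-- what changed: Drops the m*n dp table entirely: B walks each down-right diagonal from its top/left border start keeping a single running count, folding it into a global max, in O(1) extra space.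
import Mathlib
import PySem

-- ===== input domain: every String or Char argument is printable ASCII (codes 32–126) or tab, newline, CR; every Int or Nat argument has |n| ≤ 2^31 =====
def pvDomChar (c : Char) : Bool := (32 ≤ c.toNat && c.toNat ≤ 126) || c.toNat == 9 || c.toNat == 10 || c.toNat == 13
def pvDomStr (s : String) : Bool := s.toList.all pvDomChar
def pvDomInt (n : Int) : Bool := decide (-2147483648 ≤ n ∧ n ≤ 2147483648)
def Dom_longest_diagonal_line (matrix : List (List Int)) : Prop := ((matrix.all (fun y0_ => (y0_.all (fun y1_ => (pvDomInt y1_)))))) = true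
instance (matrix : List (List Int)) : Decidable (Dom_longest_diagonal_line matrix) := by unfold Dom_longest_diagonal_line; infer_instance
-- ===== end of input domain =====

-- B drops A's m*n dp table: it walks each down-right diagonal from its border start with a
-- single running count folded into a global max (same O(m*n) time, O(1) extra space).


-- ===== PORT A =====
-- matrix[i][j]; exact under Pre_ (every index taken by either program is then in range)
def mget (matrix : List (List Int)) (i j : Nat) : Int := (matrix.getD i []).getD j 0

def longest_diagonal_line (matrix : List (List Int)) : Int :=
  let m := matrix.length
  let n := (matrix.getD 0 []).length
  let dp0 : List (List Int) := (List.range m).map (fun _ => List.replicate n (0 : Int))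
  let dp1 := (List.range m).foldl (fun dp i =>
      if mget matrix i 0 = 1 then dp.set i ((dp.getD i []).set 0 1) else dp) dp0
  let dp2 := (List.range n).foldl (fun dp j =>
      if mget matrix 0 j = 1 then dp.set 0 ((dp.getD 0 []).set j 1) else dp) dp1
  let dp3 := (List.range' 1 (m - 1)).foldl (fun dp i =>
      (List.range' 1 (n - 1)).foldl (fun dp j =>
        if mget matrix i j = 1 then
          dp.set i ((dp.getD i []).set j (((dp.getD (i-1) []).getD (j-1) 0) + 1))
        else dp) dp) dp2
  (List.range m).foldl (fun mx i =>
    (List.range n).foldl (fun mx j => max mx ((dp3.getD i []).getD j 0)) mx) 0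

-- ===== PORT B =====
-- the while-loop of Source B: walk down-right from (i, j) with running count cnt and global best
def walk (matrix : List (List Int)) (m n : Nat) :
    Nat → Nat → Nat → Int → Int → Int
  | 0, _, _, _, best => best
  | fuel+1, i, j, cnt, best =>
    if i < m ∧ j < n then
      let cnt' := if mget matrix i j = 1 then cnt + 1 else 0
      walk matrix m n fuel (i+1) (j+1) cnt' (max best cnt')
    else best

def longest_diagonal_line_alt (matrix : List (List Int)) : Int :=
  let m := matrix.length
  let n := (matrix.getD 0 []).length
  let starts := (List.range n).map (fun j => ((0 : Nat), j)) ++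
                (List.range' 1 (m - 1)).map (fun i => (i, (0 : Nat)))
  starts.foldl (fun best s => walk matrix m n (m + n) s.1 s.2 0 best) 0

-- ===== PRECONDITION & SPEC =====
-- Pre_ excludes exactly the inputs where the Python A raises IndexError: the empty matrix,
-- an empty first row, and rows shorter than the first row (A reads matrix[i][j] for all
-- i < m, j < n).
def Pre_longest_diagonal_line (matrix : List (List Int)) : Prop :=
  matrix ≠ [] ∧ 1 ≤ (matrix.getD 0 []).length ∧
    ∀ row ∈ matrix, (matrix.getD 0 []).length ≤ row.length
instance (matrix : List (List Int)) : Decidable (Pre_longest_diagonal_line matrix) := by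
  unfold Pre_longest_diagonal_line; infer_instance

def pvWitness_longest_diagonal_line : List (List Int) := [[1, 0], [0, 1]]

def Spec_longest_diagonal_line (matrix : List (List Int)) (out : Int) : Prop :=
  out = longest_diagonal_line_alt matrix
instance (matrix : List (List Int)) (out : Int) : Decidable (Spec_longest_diagonal_line matrix out) := by
  unfold Spec_longest_diagonal_line; infer_instance

-- ===== CLAIM (what is proved, stated in full; the proofs are below) =====
def Claim_equal_longest_diagonal_line : Prop := ∀ (matrix : List (List Int)), Dom_longest_diagonal_line matrix → Pre_longest_diagonal_line matrix → Spec_longest_diagonal_line matrix (longest_diagonal_line matrix)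

-- ===== LEMMAS AND PROOFS =====

-- run matrix i j = length of the consecutive-ones diagonal run ending at (i, j)
def run (matrix : List (List Int)) : Nat → Nat → Int
  | 0, j => if mget matrix 0 j = 1 then 1 else 0
  | i+1, 0 => if mget matrix (i+1) 0 = 1 then 1 else 0
  | i+1, j+1 => if mget matrix (i+1) (j+1) = 1 then run matrix i j + 1 else 0

-- the count feeding a step of B's walk: run of the previous diagonal cell, 0 on the border
def prevRun (matrix : List (List Int)) : Nat → Nat → Int
  | 0, _ => 0
  | _+1, 0 => 0
  | i+1, j+1 => run matrix i j

theorem run_step (matrix : List (List Int)) (i j : Nat) :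
    run matrix i j = if mget matrix i j = 1 then prevRun matrix i j + 1 else 0 := by
  match i, j with
  | 0, j => unfold run prevRun; split <;> simp
  | i+1, 0 => unfold run prevRun; split <;> simp
  | i+1, j+1 => unfold run prevRun; rfl

-- ---------- generic max-fold over a list of cells ----------

def foldMax (matrix : List (List Int)) (L : List (Nat × Nat)) (b : Int) : Int :=
  L.foldl (fun a p => max a (run matrix p.1 p.2)) b

theorem le_foldMax (matrix : List (List Int)) :
    ∀ (L : List (Nat × Nat)) (b : Int), b ≤ foldMax matrix L b := by
  intro L
  induction L with
  | nil => intro b; simp [foldMax]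
  | cons p tl ih =>
    intro b
    have h := ih (max b (run matrix p.1 p.2))
    simp only [foldMax, List.foldl_cons] at h ⊢
    exact le_trans (le_max_left _ _) h

theorem foldMax_ge_mem (matrix : List (List Int)) :
    ∀ (L : List (Nat × Nat)) (b : Int) (p : Nat × Nat), p ∈ L →
      run matrix p.1 p.2 ≤ foldMax matrix L b := by
  intro L
  induction L with
  | nil => intro b p hp; simp at hp
  | cons q tl ih =>
    intro b p hp
    rcases List.mem_cons.1 hp with h | h
    · subst h
      have := le_foldMax matrix tl (max b (run matrix p.1 p.2))
      simp only [foldMax, List.foldl_cons] at this ⊢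
      exact le_trans (le_max_right _ _) this
    · exact ih _ p h

theorem foldMax_le (matrix : List (List Int)) :
    ∀ (L : List (Nat × Nat)) (b c : Int), b ≤ c →
      (∀ p ∈ L, run matrix p.1 p.2 ≤ c) → foldMax matrix L b ≤ c := by
  intro L
  induction L with
  | nil => intro b c hb _; simpa [foldMax] using hb
  | cons q tl ih =>
    intro b c hb hL
    simp only [foldMax, List.foldl_cons] at *
    exact ih _ c (max_le hb (hL q (List.mem_cons_self))) (fun p hp => hL p (List.mem_cons_of_mem _ hp))

-- two cell lists with the same members have the same max-fold from 0
theorem foldMax_eq_of_mem_iff (matrix : List (List Int)) (L1 L2 : List (Nat × Nat))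
    (h : ∀ p, p ∈ L1 ↔ p ∈ L2) : foldMax matrix L1 0 = foldMax matrix L2 0 := by
  apply le_antisymm
  · exact foldMax_le matrix L1 0 _ (le_foldMax matrix L2 0)
      (fun p hp => foldMax_ge_mem matrix L2 0 p ((h p).1 hp))
  · exact foldMax_le matrix L2 0 _ (le_foldMax matrix L1 0)
      (fun p hp => foldMax_ge_mem matrix L1 0 p ((h p).2 hp))

theorem foldl_flatMap_foldMax (matrix : List (List Int)) {α : Type}
    (g : α → List (Nat × Nat)) :
    ∀ (l : List α) (b : Int),
      (l.flatMap g).foldl (fun a p => max a (run matrix p.1 p.2)) b =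
        l.foldl (fun b x => foldMax matrix (g x) b) b := by
  intro l
  induction l with
  | nil => intro b; simp
  | cons x tl ih =>
    intro b
    simp only [List.flatMap_cons, List.foldl_append, List.foldl_cons]
    exact ih _

-- ---------- A side: the dp table represents run ----------

theorem getD_set_eq {α : Type} (l : List α) (i : Nat) (v d : α) (h : i < l.length) :
    (l.set i v).getD i d = v := by
  simp [List.getD_eq_getElem?_getD, h]

theorem getD_set_ne {α : Type} (l : List α) {i k : Nat} (v d : α) (h : i ≠ k) :
    (l.set i v).getD k d = l.getD k d := by
  simp [List.getD_eq_getElem?_getD, List.getElem?_set, h]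

def DPRep (m n : Nat) (dp : List (List Int)) (f : Nat → Nat → Int) : Prop :=
  dp.length = m ∧ (∀ i, i < m → (dp.getD i []).length = n) ∧
    ∀ i j, i < m → j < n → (dp.getD i []).getD j 0 = f i j

theorem dprep_congr {m n : Nat} {dp : List (List Int)} {f g : Nat → Nat → Int}
    (h : DPRep m n dp f) (hfg : ∀ i j, i < m → j < n → f i j = g i j) : DPRep m n dp g :=
  ⟨h.1, h.2.1, fun i j hi hj => (h.2.2 i j hi hj).trans (hfg i j hi hj)⟩

theorem dprep_set {m n : Nat} {dp : List (List Int)} {f : Nat → Nat → Int}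
    (h : DPRep m n dp f) (i j : Nat) (v : Int) :
    DPRep m n (dp.set i ((dp.getD i []).set j v))
      (fun a b => if a = i ∧ b = j then v else f a b) := by
  obtain ⟨hlen, hrow, hent⟩ := h
  refine ⟨by simp [hlen], ?_, ?_⟩
  · intro a ha
    by_cases hai : a = i
    · subst hai
      rw [getD_set_eq _ _ _ _ (by omega), List.length_set]
      exact hrow a ha
    · rw [getD_set_ne _ _ _ (fun e => hai e.symm)]
      exact hrow a ha
  · intro a b ha hb
    by_cases hai : a = i
    · subst hai
      rw [getD_set_eq _ _ _ _ (by omega)]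
      by_cases hbj : b = j
      · subst hbj
        rw [getD_set_eq _ _ _ _ (by rw [hrow a ha]; omega)]
        simp
      · rw [getD_set_ne _ _ _ (fun e => hbj e.symm)]
        simp only [hbj, and_false, if_false]
        exact hent a b ha hb
    · rw [getD_set_ne _ _ _ (fun e => hai e.symm)]
      simp only [hai, false_and, if_false]
      exact hent a b ha hb

theorem fold1_spec (matrix : List (List Int)) (m n : Nat) :
    ∀ (l : List Nat) (dp : List (List Int)) (f : Nat → Nat → Int), DPRep m n dp f →
      DPRep m n (l.foldl (fun dp i =>
          if mget matrix i 0 = 1 then dp.set i ((dp.getD i []).set 0 1) else dp) dp)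
        (fun a b => if a ∈ l ∧ b = 0 ∧ mget matrix a 0 = 1 then 1 else f a b) := by
  intro l
  induction l with
  | nil => intro dp f h; simpa using h
  | cons x tl ih =>
    intro dp f h
    simp only [List.foldl_cons]
    by_cases hx : mget matrix x 0 = 1
    · rw [if_pos hx]
      have h2 := ih _ _ (dprep_set h x 0 1)
      refine dprep_congr h2 ?_
      intro a b ha hb
      by_cases h1 : a ∈ tl ∧ b = 0 ∧ mget matrix a 0 = 1
      · simp [h1, h1.1, h1.2.1, h1.2.2]
      · rw [if_neg h1]
        by_cases h3 : a = x ∧ b = 0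
        · simp [h3.1, h3.2, hx]
        · have : ¬(a ∈ x :: tl ∧ b = 0 ∧ mget matrix a 0 = 1) := by
            intro hc
            rcases List.mem_cons.1 hc.1 with he | ht
            · exact h3 ⟨he, hc.2.1⟩
            · exact h1 ⟨ht, hc.2⟩
          simp only [h3, if_false, this, if_false]
    · rw [if_neg hx]
      have h2 := ih _ _ h
      refine dprep_congr h2 ?_
      intro a b ha hb
      by_cases h1 : a ∈ tl ∧ b = 0 ∧ mget matrix a 0 = 1
      · simp [h1, h1.1, h1.2.1, h1.2.2]
      · rw [if_neg h1]
        have : ¬(a ∈ x :: tl ∧ b = 0 ∧ mget matrix a 0 = 1) := by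
          intro hc
          rcases List.mem_cons.1 hc.1 with he | ht
          · subst he; exact hx hc.2.2
          · exact h1 ⟨ht, hc.2⟩
        rw [if_neg this]

theorem fold2_spec (matrix : List (List Int)) (m n : Nat) :
    ∀ (l : List Nat) (dp : List (List Int)) (f : Nat → Nat → Int), DPRep m n dp f →
      DPRep m n (l.foldl (fun dp j =>
          if mget matrix 0 j = 1 then dp.set 0 ((dp.getD 0 []).set j 1) else dp) dp)
        (fun a b => if a = 0 ∧ b ∈ l ∧ mget matrix 0 b = 1 then 1 else f a b) := by
  intro l
  induction l with
  | nil => intro dp f h; simpa using h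
  | cons x tl ih =>
    intro dp f h
    simp only [List.foldl_cons]
    by_cases hx : mget matrix 0 x = 1
    · rw [if_pos hx]
      have h2 := ih _ _ (dprep_set h 0 x 1)
      refine dprep_congr h2 ?_
      intro a b ha hb
      by_cases h1 : a = 0 ∧ b ∈ tl ∧ mget matrix 0 b = 1
      · simp [h1, h1.1, h1.2.1, h1.2.2]
      · rw [if_neg h1]
        by_cases h3 : a = 0 ∧ b = x
        · simp [h3.1, h3.2, hx]
        · have : ¬(a = 0 ∧ b ∈ x :: tl ∧ mget matrix 0 b = 1) := by
            intro hc
            rcases List.mem_cons.1 hc.2.1 with he | ht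
            · exact h3 ⟨hc.1, he⟩
            · exact h1 ⟨hc.1, ht, hc.2.2⟩
          simp only [h3, if_false, this, if_false]
    · rw [if_neg hx]
      have h2 := ih _ _ h
      refine dprep_congr h2 ?_
      intro a b ha hb
      by_cases h1 : a = 0 ∧ b ∈ tl ∧ mget matrix 0 b = 1
      · simp [h1, h1.1, h1.2.1, h1.2.2]
      · rw [if_neg h1]
        have : ¬(a = 0 ∧ b ∈ x :: tl ∧ mget matrix 0 b = 1) := by
          intro hc
          rcases List.mem_cons.1 hc.2.1 with he | ht
          · subst he; exact hx hc.2.2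
          · exact h1 ⟨hc.1, ht, hc.2.2⟩
        rw [if_neg this]

theorem fold3_inner (matrix : List (List Int)) (m n : Nat) (i : Nat)
    (hi1 : 1 ≤ i) (him : i < m) :
    ∀ (l : List Nat) (dp : List (List Int)) (f : Nat → Nat → Int), DPRep m n dp f →
      (∀ b, b < n → f (i-1) b = run matrix (i-1) b) →
      (∀ x ∈ l, 1 ≤ x ∧ x < n) →
      DPRep m n (l.foldl (fun dp j =>
          if mget matrix i j = 1 then
            dp.set i ((dp.getD i []).set j (((dp.getD (i-1) []).getD (j-1) 0) + 1))
          else dp) dp)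
        (fun a b => if a = i ∧ b ∈ l ∧ mget matrix i b = 1 then run matrix i b else f a b) := by
  intro l
  induction l with
  | nil => intro dp f h _ _; simpa using h
  | cons x tl ih =>
    intro dp f h hprev hl
    obtain ⟨hx1, hxn⟩ := hl x List.mem_cons_self
    simp only [List.foldl_cons]
    by_cases hx : mget matrix i x = 1
    · rw [if_pos hx]
      have hv : ((dp.getD (i-1) []).getD (x-1) 0) = run matrix (i-1) (x-1) := by
        rw [h.2.2 (i-1) (x-1) (by omega) (by omega)]
        exact hprev (x-1) (by omega)
      have hrunx : run matrix i x = ((dp.getD (i-1) []).getD (x-1) 0) + 1 := by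
        rw [hv, run_step matrix i x, if_pos hx]
        obtain ⟨i', rfl⟩ : ∃ i', i = i' + 1 := ⟨i - 1, by omega⟩
        obtain ⟨x', rfl⟩ : ∃ x', x = x' + 1 := ⟨x - 1, by omega⟩
        simp only [Nat.add_sub_cancel]
        rfl
      have h2 := ih _ _ (dprep_set h i x (((dp.getD (i-1) []).getD (x-1) 0) + 1))
        (by intro b hb
            show (if (i-1 = i ∧ b = x) then ((dp.getD (i-1) []).getD (x-1) 0) + 1
                  else f (i-1) b) = run matrix (i-1) b
            rw [if_neg (by intro hc; omega)]
            exact hprev b hb)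
        (fun y hy => hl y (List.mem_cons_of_mem _ hy))
      refine dprep_congr h2 ?_
      intro a b ha hb
      show (if a = i ∧ b ∈ tl ∧ mget matrix i b = 1 then run matrix i b
            else if a = i ∧ b = x then ((dp.getD (i-1) []).getD (x-1) 0) + 1 else f a b)
          = (if a = i ∧ b ∈ x :: tl ∧ mget matrix i b = 1 then run matrix i b else f a b)
      by_cases h1 : a = i ∧ b ∈ tl ∧ mget matrix i b = 1
      · rw [if_pos h1, if_pos ⟨h1.1, List.mem_cons_of_mem _ h1.2.1, h1.2.2⟩]
      · rw [if_neg h1]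
        by_cases h3 : a = i ∧ b = x
        · obtain ⟨rfl, rfl⟩ := h3
          rw [if_pos ⟨rfl, rfl⟩, if_pos ⟨rfl, List.mem_cons_self, hx⟩]
          exact hrunx.symm
        · have hno : ¬(a = i ∧ b ∈ x :: tl ∧ mget matrix i b = 1) := by
            intro hc
            rcases List.mem_cons.1 hc.2.1 with he | ht
            · exact h3 ⟨hc.1, he⟩
            · exact h1 ⟨hc.1, ht, hc.2.2⟩
          rw [if_neg h3, if_neg hno]
    · rw [if_neg hx]
      have h2 := ih _ _ h hprev (fun y hy => hl y (List.mem_cons_of_mem _ hy))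
      refine dprep_congr h2 ?_
      intro a b ha hb
      show (if a = i ∧ b ∈ tl ∧ mget matrix i b = 1 then run matrix i b else f a b)
          = (if a = i ∧ b ∈ x :: tl ∧ mget matrix i b = 1 then run matrix i b else f a b)
      by_cases h1 : a = i ∧ b ∈ tl ∧ mget matrix i b = 1
      · rw [if_pos h1, if_pos ⟨h1.1, List.mem_cons_of_mem _ h1.2.1, h1.2.2⟩]
      · rw [if_neg h1]
        have hno : ¬(a = i ∧ b ∈ x :: tl ∧ mget matrix i b = 1) := by
          intro hc
          rcases List.mem_cons.1 hc.2.1 with he | ht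
          · exact h1 ⟨hc.1, by rw [← he] at hc; exact absurd hc.2.2 (he ▸ hx), hc.2.2⟩
          · exact h1 ⟨hc.1, ht, hc.2.2⟩
        rw [if_neg hno]

def Gfun (matrix : List (List Int)) (k : Nat) (a b : Nat) : Int :=
  if a = 0 ∨ b = 0 ∨ a ≤ k then run matrix a b else 0

theorem fold3_outer (matrix : List (List Int)) (m n : Nat) :
    ∀ (k : Nat), k ≤ m - 1 → 1 ≤ m →
      ∀ (dp : List (List Int)) (f : Nat → Nat → Int), DPRep m n dp f →
      (∀ a b, a < m → b < n → f a b = Gfun matrix 0 a b) →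
      DPRep m n ((List.range' 1 k).foldl (fun dp i =>
          (List.range' 1 (n-1)).foldl (fun dp j =>
            if mget matrix i j = 1 then
              dp.set i ((dp.getD i []).set j (((dp.getD (i-1) []).getD (j-1) 0) + 1))
            else dp) dp) dp)
        (Gfun matrix k) := by
  intro k
  induction k with
  | zero =>
    intro _ _ dp f h hf
    simpa using dprep_congr h hf
  | succ k ih =>
    intro hk hm dp f h hf
    have hrange : List.range' 1 (k+1) = List.range' 1 k ++ [1+k] := by
      rw [List.range'_concat]
      simp
    rw [hrange, List.foldl_append, List.foldl_cons, List.foldl_nil]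
    have hIH := ih (by omega) hm dp f h hf
    have hinner := fold3_inner matrix m n (1+k) (by omega) (by omega)
      (List.range' 1 (n-1)) _ (Gfun matrix k) hIH
      (by intro b hb
          unfold Gfun
          rw [if_pos (by omega)])
      (by intro x hxmem
          have := List.mem_range'_1.1 hxmem
          omega)
    refine dprep_congr hinner ?_
    intro a b ha hb
    unfold Gfun
    by_cases h1 : a = 1+k ∧ b ∈ List.range' 1 (n-1) ∧ mget matrix a b = 1
    · obtain ⟨rfl, hbm, hmg⟩ := h1
      rw [if_pos ⟨rfl, hbm, hmg⟩, if_pos (by omega)]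
    · rw [if_neg (by intro hc; exact h1 ⟨hc.1, hc.2.1, by rw [hc.1]; exact hc.2.2⟩)]
      by_cases h2 : a = 0 ∨ b = 0 ∨ a ≤ k
      · rw [if_pos h2, if_pos (by omega)]
      · rw [if_neg h2]
        by_cases h3 : a = 0 ∨ b = 0 ∨ a ≤ k + 1
        · -- then a = k+1, b ≥ 1, and mget matrix a b ≠ 1 (else h1); run = 0
          rw [if_pos h3]
          have hab : a = 1+k := by omega
          have hbmem : b ∈ List.range' 1 (n-1) := List.mem_range'_1.2 (by omega)
          have hmg : mget matrix a b ≠ 1 := fun hc => h1 ⟨hab, hbmem, hc⟩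
          obtain ⟨a', rfl⟩ : ∃ a', a = a' + 1 := ⟨a - 1, by omega⟩
          obtain ⟨b', rfl⟩ : ∃ b', b = b' + 1 := ⟨b - 1, by omega⟩
          unfold run
          rw [if_neg hmg]
        · rw [if_neg h3]

-- the initial dp table of zeros
theorem dprep_dp0 (matrix : List (List Int)) (m n : Nat) :
    DPRep m n ((List.range m).map (fun _ => List.replicate n (0 : Int))) (fun _ _ => 0) := by
  refine ⟨by simp, ?_, ?_⟩
  · intro i hi
    rw [List.getD_eq_getElem?_getD]
    simp [List.getElem?_map, List.getElem?_range, hi]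
  · intro i j hi hj
    simp [List.getD_eq_getElem?_getD, hi, hj, List.getElem?_replicate]

-- A's dp3 table holds run everywhere in bounds
theorem dp3_rep (matrix : List (List Int)) (hm : 1 ≤ matrix.length) :
    DPRep matrix.length (matrix.getD 0 []).length
      ((List.range' 1 (matrix.length - 1)).foldl (fun dp i =>
          (List.range' 1 ((matrix.getD 0 []).length - 1)).foldl (fun dp j =>
            if mget matrix i j = 1 then
              dp.set i ((dp.getD i []).set j (((dp.getD (i-1) []).getD (j-1) 0) + 1))
            else dp) dp)
        ((List.range (matrix.getD 0 []).length).foldl (fun dp j =>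
            if mget matrix 0 j = 1 then dp.set 0 ((dp.getD 0 []).set j 1) else dp)
          ((List.range matrix.length).foldl (fun dp i =>
              if mget matrix i 0 = 1 then dp.set i ((dp.getD i []).set 0 1) else dp)
            ((List.range matrix.length).map (fun _ => List.replicate (matrix.getD 0 []).length (0 : Int))))))
      (fun a b => run matrix a b) := by
  set m := matrix.length with hmdef
  set n := (matrix.getD 0 []).length with hndef
  have h0 := dprep_dp0 matrix m n
  have h1 := fold1_spec matrix m n (List.range m) _ _ h0
  have h2 := fold2_spec matrix m n (List.range n) _ _ h1
  have h3 := fold3_outer matrix m n (m-1) (le_refl _) hm _ _ h2 ?_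
  · refine dprep_congr h3 ?_
    intro a b ha hb
    unfold Gfun
    rw [if_pos (by omega)]
  · -- f2 = Gfun 0 on bounds
    intro a b ha hb
    show (if a = 0 ∧ b ∈ List.range (matrix.getD 0 []).length ∧ mget matrix 0 b = 1 then (1:Int)
          else if a ∈ List.range matrix.length ∧ b = 0 ∧ mget matrix a 0 = 1 then 1 else 0)
        = Gfun matrix 0 a b
    unfold Gfun
    by_cases hA : a = 0
    · subst hA
      rw [if_pos (Or.inl rfl)]
      by_cases hmg : mget matrix 0 b = 1
      · rw [if_pos ⟨rfl, List.mem_range.2 hb, hmg⟩]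
        match b with
        | 0 => unfold run; rw [if_pos hmg]
        | b'+1 => unfold run; rw [if_pos hmg]
      · rw [if_neg (by intro hc; exact hmg hc.2.2)]
        match b with
        | 0 =>
          by_cases hmg0 : mget matrix 0 0 = 1
          · rw [if_pos ⟨List.mem_range.2 ha, rfl, hmg0⟩]; unfold run; rw [if_pos hmg0]
          · rw [if_neg (by intro hc; exact hmg0 hc.2.2)]
            unfold run; rw [if_neg hmg]
        | b'+1 =>
          rw [if_neg (by intro hc; exact Nat.succ_ne_zero b' hc.2.1)]
          unfold run; rw [if_neg hmg]
    · rw [if_neg (by intro hc; exact hA hc.1)]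
      by_cases hB : b = 0
      · subst hB
        rw [if_pos (Or.inr (Or.inl rfl))]
        obtain ⟨a', rfl⟩ : ∃ a', a = a' + 1 := ⟨a - 1, by omega⟩
        by_cases hmg : mget matrix (a'+1) 0 = 1
        · rw [if_pos ⟨List.mem_range.2 ha, rfl, hmg⟩]; unfold run; rw [if_pos hmg]
        · rw [if_neg (by intro hc; exact hmg hc.2.2)]
          unfold run; rw [if_neg hmg]
      · rw [if_neg (by intro hc; exact hB hc.2.1), if_neg (by omega)]

-- ---------- B side: the walk computes the max of run over its diagonal cells ----------

def cells (m n : Nat) : Nat → Nat → Nat → List (Nat × Nat)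
  | 0, _, _ => []
  | fuel+1, i, j => if i < m ∧ j < n then (i, j) :: cells m n fuel (i+1) (j+1) else []

theorem walk_eq (matrix : List (List Int)) (m n : Nat) :
    ∀ (fuel i j : Nat) (best : Int),
      walk matrix m n fuel i j (prevRun matrix i j) best =
        foldMax matrix (cells m n fuel i j) best := by
  intro fuel
  induction fuel with
  | zero => intro i j best; simp [walk, cells, foldMax]
  | succ fuel ih =>
    intro i j best
    unfold walk cells
    by_cases hij : i < m ∧ j < n
    · rw [if_pos hij, if_pos hij]
      simp only [foldMax, List.foldl_cons]
      have hcnt : (if mget matrix i j = 1 then prevRun matrix i j + 1 else 0) = run matrix i j :=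
        (run_step matrix i j).symm
      rw [hcnt]
      have hprev : run matrix i j = prevRun matrix (i+1) (j+1) := rfl
      calc walk matrix m n fuel (i+1) (j+1) (run matrix i j) (max best (run matrix i j))
          = walk matrix m n fuel (i+1) (j+1) (prevRun matrix (i+1) (j+1)) (max best (run matrix i j)) := by rw [← hprev]
        _ = foldMax matrix (cells m n fuel (i+1) (j+1)) (max best (run matrix i j)) := ih _ _ _
    · rw [if_neg hij, if_neg hij]
      simp [foldMax]

theorem mem_cells (m n : Nat) :
    ∀ (fuel i j : Nat) (p : Nat × Nat), p ∈ cells m n fuel i j → p.1 < m ∧ p.2 < n := by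
  intro fuel
  induction fuel with
  | zero => intro i j p hp; simp [cells] at hp
  | succ fuel ih =>
    intro i j p hp
    unfold cells at hp
    by_cases hij : i < m ∧ j < n
    · rw [if_pos hij] at hp
      rcases List.mem_cons.1 hp with he | ht
      · subst he; exact hij
      · exact ih _ _ p ht
    · rw [if_neg hij] at hp; simp at hp

theorem cells_cover (m n : Nat) :
    ∀ (fuel t i j : Nat), t < fuel → i + t < m → j + t < n →
      (i + t, j + t) ∈ cells m n fuel i j := by
  intro fuel
  induction fuel with
  | zero => intro t i j ht _ _; omega
  | succ fuel ih =>
    intro t i j ht him hjn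
    unfold cells
    rw [if_pos ⟨by omega, by omega⟩]
    match t with
    | 0 => simp
    | t'+1 =>
      apply List.mem_cons_of_mem
      have := ih t' (i+1) (j+1) (by omega) (by omega) (by omega)
      have he : (i+1+t', j+1+t') = (i + (t'+1), j + (t'+1)) := by
        simp only [Prod.mk.injEq]; omega
      rwa [he] at this

-- ===== final assembly =====

def allCells (m n : Nat) : List (Nat × Nat) :=
  (List.range m).flatMap (fun i => (List.range n).map (fun j => (i, j)))

theorem mem_allCells (m n : Nat) (p : Nat × Nat) :
    p ∈ allCells m n ↔ p.1 < m ∧ p.2 < n := by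
  unfold allCells
  constructor
  · intro hp
    obtain ⟨i, hi, hp2⟩ := List.mem_flatMap.1 hp
    obtain ⟨j, hj, rfl⟩ := List.mem_map.1 hp2
    exact ⟨List.mem_range.1 hi, List.mem_range.1 hj⟩
  · intro ⟨h1, h2⟩
    exact List.mem_flatMap.2 ⟨p.1, List.mem_range.2 h1,
      List.mem_map.2 ⟨p.2, List.mem_range.2 h2, rfl⟩⟩

def diagCells (m n : Nat) : List (Nat × Nat) :=
  ((List.range n).map (fun j => ((0 : Nat), j)) ++
    (List.range' 1 (m - 1)).map (fun i => (i, (0 : Nat)))).flatMap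
    (fun s => cells m n (m + n) s.1 s.2)

theorem mem_diagCells (m n : Nat) (p : Nat × Nat) :
    p ∈ diagCells m n ↔ p.1 < m ∧ p.2 < n := by
  unfold diagCells
  constructor
  · intro hp
    obtain ⟨s, _, hp2⟩ := List.mem_flatMap.1 hp
    exact mem_cells m n _ _ _ p hp2
  · intro ⟨h1, h2⟩
    apply List.mem_flatMap.2
    by_cases hab : p.1 ≤ p.2
    · refine ⟨(0, p.2 - p.1), ?_, ?_⟩
      · exact List.mem_append_left _ (List.mem_map.2 ⟨p.2 - p.1, List.mem_range.2 (by omega), rfl⟩)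
      · have := cells_cover m n (m + n) p.1 0 (p.2 - p.1) (by omega) (by omega) (by omega)
        have he : ((0 : Nat) + p.1, p.2 - p.1 + p.1) = p := by
          obtain ⟨a, b⟩ := p; simp only [Prod.mk.injEq]; simp at hab ⊢; omega
        rwa [he] at this
    · refine ⟨(p.1 - p.2, 0), ?_, ?_⟩
      · exact List.mem_append_right _ (List.mem_map.2
          ⟨p.1 - p.2, List.mem_range'_1.2 (by omega), rfl⟩)
      · have := cells_cover m n (m + n) p.2 (p.1 - p.2) 0 (by omega) (by omega) (by omega)
        have he : (p.1 - p.2 + p.2, (0 : Nat) + p.2) = p := by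
          obtain ⟨a, b⟩ := p; simp only [Prod.mk.injEq]; simp at hab ⊢; omega
        rwa [he] at this

-- A equals the max of run over all in-bounds cells
theorem A_eq_foldMax (matrix : List (List Int)) (hm : 1 ≤ matrix.length) :
    longest_diagonal_line matrix =
      foldMax matrix (allCells matrix.length (matrix.getD 0 []).length) 0 := by
  have hrep := dp3_rep matrix hm
  unfold longest_diagonal_line
  simp only []
  set m := matrix.length
  set n := (matrix.getD 0 []).length
  rw [show foldMax matrix (allCells m n) 0 =
      (List.range m).foldl (fun mx i =>
        (List.range n).foldl (fun mx j => max mx (run matrix i j)) mx) 0 from ?_]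
  · apply PySem.List.foldl_congr_mem
    intro acc i hi
    apply PySem.List.foldl_congr_mem
    intro acc2 j hj
    rw [hrep.2.2 i j (List.mem_range.1 hi) (List.mem_range.1 hj)]
  · unfold foldMax allCells
    rw [foldl_flatMap_foldMax]
    apply PySem.List.foldl_congr_mem
    intro acc i _
    unfold foldMax
    rw [List.foldl_map]

-- B equals the max of run over the diagonal cells
theorem B_eq_foldMax (matrix : List (List Int)) :
    longest_diagonal_line_alt matrix =
      foldMax matrix (diagCells matrix.length (matrix.getD 0 []).length) 0 := by
  unfold longest_diagonal_line_alt
  simp only []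
  set m := matrix.length
  set n := (matrix.getD 0 []).length
  unfold diagCells foldMax
  rw [foldl_flatMap_foldMax]
  apply PySem.List.foldl_congr_mem
  intro acc s hs
  have hs0 : s.1 = 0 ∨ s.2 = 0 := by
    rcases List.mem_append.1 hs with h | h
    · obtain ⟨j, _, rfl⟩ := List.mem_map.1 h; exact Or.inl rfl
    · obtain ⟨i, _, rfl⟩ := List.mem_map.1 h; exact Or.inr rfl
  have hp : (0 : Int) = prevRun matrix s.1 s.2 := by
    rcases hs0 with h | h
    · obtain ⟨a, b⟩ := s; simp only at h; subst h; rfl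
    · obtain ⟨a, b⟩ := s
      simp only at h; subst h
      match a with
      | 0 => rfl
      | a'+1 => rfl
  rw [hp, walk_eq]

-- ===== VERDICT (by name: the statement is the Claim_ definition above) =====
theorem longest_diagonal_line_spec : Claim_equal_longest_diagonal_line := by
  intro matrix _ hpre
  unfold Spec_longest_diagonal_line
  have hm : 1 ≤ matrix.length := by
    rcases hpre with ⟨h1, _, _⟩
    cases matrix with
    | nil => exact absurd rfl h1
    | cons x tl => simp
  rw [A_eq_foldMax matrix hm, B_eq_foldMax matrix]
  exact (foldMax_eq_of_mem_iff matrix _ _ (fun p => by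
    rw [mem_allCells, mem_diagCells])).symm
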